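-- pv_equiv track=rewrite | github.com/Rustemhak/Unstructured-field-data-aggregator | pullenti/unitext/internal/zip/DeflaterHuffman.py | __lcode
-- ===== SOURCE A (Python) =====
-- def __lcode(length : int) -> int:
--     if (length == 255):
--         return 285
--     code = 257
--     while length >= 8:
--         code += 4
--         length >>= 1
--     return code + length
-- ===== SOURCE B (Python) =====
-- def __lcode(length : int) -> int:
--     if length == 255:
--         return 285
--     if length < 8:
--         return 257 + length
--     t = length.bit_length() - 3
--     return 257 + 4 * t + (length >> t)
-- ===== Notes on version B (the rewrite author's own statement) =====
-- stated objective: simpler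
-- what changed: Replaces the halving while-loop with a bit_length-based closed form: for length >= 8 the loop shifts until the value lies in [4,7], adding 4 per shift, so the answer is 257 + 4*t + (length >> t) with t = bit_length - 3; the 255 special case and the <8 branch (including negatives) are kept.
import Mathlib
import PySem

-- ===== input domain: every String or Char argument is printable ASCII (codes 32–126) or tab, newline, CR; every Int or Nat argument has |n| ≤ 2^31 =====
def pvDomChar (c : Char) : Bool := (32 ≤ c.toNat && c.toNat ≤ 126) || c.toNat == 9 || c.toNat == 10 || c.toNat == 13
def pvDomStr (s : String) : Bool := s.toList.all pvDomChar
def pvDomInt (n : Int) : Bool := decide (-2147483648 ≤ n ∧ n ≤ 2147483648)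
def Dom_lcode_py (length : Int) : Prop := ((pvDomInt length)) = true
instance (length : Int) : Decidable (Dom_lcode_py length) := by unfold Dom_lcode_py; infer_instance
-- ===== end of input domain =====

-- B replaces A's halving while-loop by a bit_length-based closed form (same values; simpler, loop-free).


-- ===== PORT A =====
-- the while loop: 'while length >= 8: code += 4; length >>= 1'  (>> 1 = floor division by 2)
def lcodeLoop (code length : Int) : Int :=
  if 8 ≤ length then lcodeLoop (code + 4) (PySem.Int.floordiv length 2)
  else code + length
termination_by length.toNat
decreasing_by
  rw [PySem.Int.floordiv_eq_ediv_of_pos (by omega)]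
  omega

def lcode_py (length : Int) : Int :=
  if length = 255 then 285
  else lcodeLoop 257 length

-- ===== PORT B =====
def lcode_py_alt (length : Int) : Int :=
  if length = 255 then 285
  else if length < 8 then 257 + length
  else
    let t : Nat := PySem.Int.bitLength length - 3
    257 + 4 * (t : Int) + PySem.Int.floordiv length (2 ^ t)

-- ===== PRECONDITION & SPEC =====
def Spec_lcode_py (length : Int) (out : Int) : Prop := out = lcode_py_alt length
instance (length : Int) (out : Int) : Decidable (Spec_lcode_py length out) := by unfold Spec_lcode_py; infer_instance

-- ===== CLAIM (what is proved, stated in full; the proofs are below) =====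
def Claim_equal_lcode_py : Prop := ∀ (length : Int), Dom_lcode_py length → Spec_lcode_py length (lcode_py length)

-- ===== LEMMAS AND PROOFS =====

lemma bitLength_ge_four {n : Int} (h : 8 ≤ n) : 4 ≤ PySem.Int.bitLength n := by
  by_contra hlt
  have h1 : n.natAbs < 2 ^ PySem.Int.bitLength n := PySem.Int.lt_two_pow_bitLength n
  have h2 : 2 ^ PySem.Int.bitLength n ≤ 2 ^ 3 :=
    Nat.pow_le_pow_right (by norm_num) (by omega)
  have : 8 ≤ n.natAbs := by omega
  simp at h2
  omega

lemma bitLength_eq_four {n : Int} (h8 : 8 ≤ n) (h16 : n < 16) :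
    PySem.Int.bitLength n = 4 := by
  have h1 : 4 ≤ PySem.Int.bitLength n := bitLength_ge_four h8
  have hne : n ≠ 0 := by omega
  have h2 : 2 ^ (PySem.Int.bitLength n - 1) ≤ n.natAbs := PySem.Int.two_pow_bitLength_le n hne
  by_contra hne4
  have h5 : 5 ≤ PySem.Int.bitLength n := by omega
  have h3 : 2 ^ 4 ≤ 2 ^ (PySem.Int.bitLength n - 1) :=
    Nat.pow_le_pow_right (by norm_num) (by omega)
  simp at h3
  omega

-- loop characterisation: starting at any value ≥ 8, the loop adds 4 per halving
-- and stops with a value in [4,7], i.e. with length >> (bitLength length - 3).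
lemma lcodeLoop_eq (n : Int) (h : 8 ≤ n) (code : Int) :
    lcodeLoop code n =
      code + 4 * ((PySem.Int.bitLength n - 3 : Nat) : Int)
        + PySem.Int.floordiv n (2 ^ (PySem.Int.bitLength n - 3)) := by
  by_cases h16 : n < 16
  · -- one iteration: bitLength = 4, t = 1
    have hb : PySem.Int.bitLength n = 4 := bitLength_eq_four h h16
    rw [lcodeLoop, if_pos h, lcodeLoop]
    have hlt : PySem.Int.floordiv n 2 < 8 := by
      rw [PySem.Int.floordiv_eq_ediv_of_pos (by omega)]; omega
    rw [if_neg (by omega), hb]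
    norm_num
  · -- n ≥ 16: halve and use the induction hypothesis
    have hm : 8 ≤ PySem.Int.floordiv n 2 := by
      rw [PySem.Int.floordiv_eq_ediv_of_pos (by omega)]; omega
    have ih := lcodeLoop_eq (PySem.Int.floordiv n 2) hm (code + 4)
    rw [lcodeLoop, if_pos h, ih]
    have hbl : PySem.Int.bitLength n = PySem.Int.bitLength (PySem.Int.floordiv n 2) + 1 :=
      PySem.Int.bitLength_of_pos (by omega)
    have h4 : 4 ≤ PySem.Int.bitLength (PySem.Int.floordiv n 2) := bitLength_ge_four hm
    have ht : PySem.Int.bitLength n - 3 = (PySem.Int.bitLength (PySem.Int.floordiv n 2) - 3) + 1 := by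
      omega
    set k := PySem.Int.bitLength (PySem.Int.floordiv n 2) - 3 with hk
    rw [ht]
    have hdiv : PySem.Int.floordiv (PySem.Int.floordiv n 2) (2 ^ k)
        = PySem.Int.floordiv n (2 ^ (k + 1)) := by
      rw [PySem.Int.floordiv_eq_ediv_of_pos (b := 2) (by omega),
          PySem.Int.floordiv_eq_ediv_of_pos (by positivity),
          PySem.Int.floordiv_eq_ediv_of_pos (by positivity)]
      rw [Int.ediv_ediv_of_nonneg (x := n) (by positivity)]
      congr 1
      rw [pow_succ, mul_comm]
    rw [hdiv]
    push_cast
    ring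
termination_by n.toNat
decreasing_by
  rw [PySem.Int.floordiv_eq_ediv_of_pos (by omega)]
  omega

-- ===== VERDICT (by name: the statement is the Claim_ definition above) =====
theorem lcode_py_spec : Claim_equal_lcode_py := by
  intro length _
  show lcode_py length = lcode_py_alt length
  unfold lcode_py lcode_py_alt
  by_cases h255 : length = 255
  · simp [h255]
  · rw [if_neg h255, if_neg h255]
    by_cases h8 : length < 8
    · rw [lcodeLoop, if_neg (by omega), if_pos h8]
    · rw [if_neg h8, lcodeLoop_eq length (by omega)]
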